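-- pv_equiv track=rewrite | github.com/mirzayasirabdullahbaig07/AI-Complete-Learning-Journey-Part-2 | 01_Python/500-Python-Programs/Programs_For_Python.py | replace_duplicates
-- ===== SOURCE A (Python) =====
-- def replace_duplicates(s):
--     seen, result = set(), ""
--     for ch in s:
--         if ch in seen:
--             result += "_"
--         else:
--             seen.add(ch)
--             result += ch
--     return result
-- ===== SOURCE B (Python) =====
-- def replace_duplicates(s):
--     # Peel off the first remaining character, then blank out all of its later
--     # occurrences in the remainder with str.replace before continuing: no seen-set,
--     # no membership tests. Correct because a replaced '_' stays '_' forever.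
--     out = []
--     rest = s
--     while rest:
--         head = rest[0]
--         out.append(head)
--         rest = rest[1:].replace(head, "_")
--     return "".join(out)
-- ===== Notes on version B (the rewrite author's own statement) =====
-- stated objective: alternative
-- what changed: Instead of a single pass with a maintained seen-set, B repeatedly peels the first remaining character and masks all its later occurrences in the remainder with str.replace, so duplicates are erased eagerly and no set or membership test exists.
import Mathlib
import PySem

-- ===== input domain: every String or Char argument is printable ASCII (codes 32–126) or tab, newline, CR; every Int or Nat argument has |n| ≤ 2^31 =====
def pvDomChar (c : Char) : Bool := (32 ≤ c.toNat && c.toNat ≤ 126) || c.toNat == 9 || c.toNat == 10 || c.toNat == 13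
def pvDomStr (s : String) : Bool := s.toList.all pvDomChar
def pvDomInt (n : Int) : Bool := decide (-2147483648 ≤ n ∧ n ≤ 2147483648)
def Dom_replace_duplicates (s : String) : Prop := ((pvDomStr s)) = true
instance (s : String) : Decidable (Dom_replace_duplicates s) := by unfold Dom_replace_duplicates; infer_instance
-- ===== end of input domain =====

-- B replaces A's seen-set single pass by repeatedly peeling the first remaining
-- character and masking its later occurrences via str.replace (objective: alternative).

-- ===== PORT A =====
-- one loop step of A: if ch in seen: result += "_" else: seen.add(ch); result += ch
def pvStepA (st : PySem.Set Char × List Char) (ch : Char) : PySem.Set Char × List Char :=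
  if PySem.Set.contains st.1 ch then (st.1, st.2 ++ ['_'])
  else (PySem.Set.add st.1 ch, st.2 ++ [ch])

def replace_duplicates (s : String) : String :=
  String.mk (s.toList.foldl pvStepA (PySem.Set.empty, [])).2

-- ===== PORT B =====
-- while rest: head = rest[0]; out.append(head); rest = rest[1:].replace(head, "_")
-- rest[1:] is the tail; str.replace with a single-char pattern replaces every
-- occurrence, ported exactly as a map over the remaining characters.
def pvLoopB (out : List Char) (rest : List Char) : List Char :=
  match rest with
  | [] => out
  | head :: t => pvLoopB (out ++ [head]) (t.map (fun c => if c = head then '_' else c))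
termination_by rest.length
decreasing_by simp

def replace_duplicates_alt (s : String) : String :=
  String.mk (pvLoopB [] s.toList)

-- ===== PRECONDITION & SPEC =====
def Spec_replace_duplicates (s : String) (out : String) : Prop := out = replace_duplicates_alt s
instance (s : String) (out : String) : Decidable (Spec_replace_duplicates s out) := by unfold Spec_replace_duplicates; infer_instance

-- ===== CLAIM (what is proved, stated in full; the proofs are below) =====
def Claim_equal_replace_duplicates : Prop := ∀ (s : String), Dom_replace_duplicates s → Spec_replace_duplicates s (replace_duplicates s)

-- ===== LEMMAS AND PROOFS =====

-- accumulator-free form of B's loop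
def pvGoB : List Char → List Char
  | [] => []
  | head :: t => head :: pvGoB (t.map (fun c => if c = head then '_' else c))
termination_by l => l.length
decreasing_by simp

-- specification skeleton of A: emit '_' iff already seen, threading the seen prefix
def pvGoA (seen : List Char) : List Char → List Char
  | [] => []
  | ch :: rest => if ch ∈ seen then '_' :: pvGoA seen rest else ch :: pvGoA (ch :: seen) rest

lemma pvFoldA (l : List Char) :
    ∀ (seen : PySem.Set Char) (seenL : List Char) (acc : List Char),
      (∀ c, c ∈ seen ↔ c ∈ seenL) →
      (l.foldl pvStepA (seen, acc)).2 = acc ++ pvGoA seenL l := by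
  induction l with
  | nil => intro seen seenL acc _; simp [pvGoA]
  | cons ch rest ih =>
    intro seen seenL acc h
    simp only [List.foldl_cons, pvStepA, pvGoA]
    by_cases hm : ch ∈ seenL
    · have hc : PySem.Set.contains seen ch = true := by
        simp [PySem.Set.contains, (h ch).mpr hm]
      rw [hc, if_pos hm, if_pos rfl, ih seen seenL _ h]
      simp
    · have hc : PySem.Set.contains seen ch = false := by
        simp [PySem.Set.contains]
        exact fun hx => hm ((h ch).mp hx)
      rw [hc, if_neg hm, if_neg (by simp)]
      rw [ih (PySem.Set.add seen ch) (ch :: seenL) _ (by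
        intro c
        rw [PySem.Set.mem_add]
        simp only [List.mem_cons]
        exact (or_congr (h c) Iff.rfl).trans or_comm)]
      simp

lemma pvLoopB_eq (n : Nat) :
    ∀ rest : List Char, rest.length ≤ n → ∀ out, pvLoopB out rest = out ++ pvGoB rest := by
  induction n with
  | zero =>
    intro rest h out
    have : rest = [] := List.eq_nil_of_length_eq_zero (Nat.le_zero.mp h)
    subst this; simp [pvLoopB, pvGoB]
  | succ n ih =>
    intro rest h out
    match rest with
    | [] => simp [pvLoopB, pvGoB]
    | head :: t =>
      rw [pvLoopB, pvGoB, ih _ (by simpa using Nat.lt_succ_iff.mp (by simpa using h)) _]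
      simp

-- key invariant: A with seen-prefix `seen` equals B on the remainder masked by `seen`
lemma pvGoA_eq_goB (l : List Char) :
    ∀ seen, pvGoA seen l = pvGoB (l.map (fun c => if c ∈ seen then '_' else c)) := by
  induction l with
  | nil => intro seen; simp [pvGoA, pvGoB]
  | cons ch rest ih =>
    intro seen
    simp only [pvGoA, List.map_cons]
    by_cases hm : ch ∈ seen
    · rw [if_pos hm, if_pos hm, pvGoB, List.map_map]
      congr 1
      rw [ih seen]
      congr 1
      apply List.map_congr_left
      intro c _
      simp only [Function.comp]
      by_cases hc : c ∈ seen
      · simp [hc]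
      · simp only [if_neg hc]
        by_cases he : c = '_' <;> simp [he]
    · rw [if_neg hm, if_neg hm, pvGoB, List.map_map]
      congr 1
      rw [ih (ch :: seen)]
      congr 1
      apply List.map_congr_left
      intro c _
      simp only [Function.comp, List.mem_cons]
      by_cases hc : c ∈ seen
      · have : ¬ c = ch := fun he => hm (he ▸ hc)
        simp [hc, this]
      · by_cases he : c = ch
        · subst he
          simp [hc]
        · simp [hc, he]

-- ===== VERDICT (by name: the statement is the Claim_ definition above) =====
theorem replace_duplicates_spec : Claim_equal_replace_duplicates := by
  intro s _
  unfold Spec_replace_duplicates replace_duplicates replace_duplicates_alt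
  rw [pvFoldA s.toList PySem.Set.empty [] [] (by intro c; simp [PySem.Set.empty]),
      pvLoopB_eq s.toList.length s.toList le_rfl, pvGoA_eq_goB]
  simp
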